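-- pv_equiv track=rewrite | github.com/moiassrdinho80/home-scraper | emailer.py | format_email_body
-- ===== SOURCE A (Python) =====
-- from typing import List, Dict
--
-- def format_email_body(listings: List[Dict[str, str]]) -> str:
--     """
--     Format listings as a plain text numbered list.
--
--     Args:
--         listings: List of listing dictionaries
--
--     Returns:
--         Formatted email body as string
--     """
--     if not listings:
--         return "No new listings found."
--
--     lines = []
--     for i, listing in enumerate(listings, start=1):
--         # Title with status
--         title_line = f"{i}) {listing.get('title', 'Unknown')}"
--         status = listing.get('status', '').strip()
--         if status:
--             title_line += f" ({status})"
--         lines.append(title_line)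
--
--         # Price
--         price = listing.get('price', '').strip()
--         if price:
--             lines.append(f"   Price: {price}")
--
--         # Location
--         location = listing.get('location', '').strip()
--         if location:
--             lines.append(f"   Location: {location}")
--
--         # Details
--         details = listing.get('details_text', '').strip()
--         if details:
--             for detail_line in details.split('\n'):
--                 if detail_line.strip():
--                     lines.append(f"   {detail_line}")
--
--         # URL
--         url = listing.get('url', '').strip()
--         if url:
--             lines.append(f"   Link: {url}")
--
--         # Blank line between listings
--         if i < len(listings):
--             lines.append("")
--
--     return "\n".join(lines)
-- ===== SOURCE B (Python) =====
-- from typing import List, Dict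
--
--
-- def format_email_body(listings: List[Dict[str, str]]) -> str:
--     """Recursive, list-free formatter: each listing's block is built by direct
--     string concatenation and the listings are consumed by structural recursion,
--     gluing blocks with '\n\n' instead of maintaining a flat line list."""
--     if not listings:
--         return "No new listings found."
--
--     def block(i, listing):
--         s = f"{i}) {listing.get('title', 'Unknown')}"
--         status = listing.get('status', '').strip()
--         if status:
--             s += f" ({status})"
--         price = listing.get('price', '').strip()
--         if price:
--             s += f"\n   Price: {price}"
--         location = listing.get('location', '').strip()
--         if location:
--             s += f"\n   Location: {location}"
--         details = listing.get('details_text', '').strip()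
--         if details:
--             for dl in details.split('\n'):
--                 if dl.strip():
--                     s += f"\n   {dl}"
--         url = listing.get('url', '').strip()
--         if url:
--             s += f"\n   Link: {url}"
--         return s
--
--     def rec(i, rest):
--         head = block(i, rest[0])
--         if len(rest) == 1:
--             return head
--         return head + "\n\n" + rec(i + 1, rest[1:])
--
--     return rec(1, listings)
-- ===== Notes on version B (the rewrite author's own statement) =====
-- stated objective: alternative
-- what changed: B abandons the intermediate line list entirely: each listing's block is built by direct string concatenation (+=), and the listings are consumed by structural recursion from the front, gluing blocks with '\n\n' as it returns, instead of A's iterative accumulation of a flat line list with conditional trailing blanks followed by one join.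
import Mathlib
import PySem

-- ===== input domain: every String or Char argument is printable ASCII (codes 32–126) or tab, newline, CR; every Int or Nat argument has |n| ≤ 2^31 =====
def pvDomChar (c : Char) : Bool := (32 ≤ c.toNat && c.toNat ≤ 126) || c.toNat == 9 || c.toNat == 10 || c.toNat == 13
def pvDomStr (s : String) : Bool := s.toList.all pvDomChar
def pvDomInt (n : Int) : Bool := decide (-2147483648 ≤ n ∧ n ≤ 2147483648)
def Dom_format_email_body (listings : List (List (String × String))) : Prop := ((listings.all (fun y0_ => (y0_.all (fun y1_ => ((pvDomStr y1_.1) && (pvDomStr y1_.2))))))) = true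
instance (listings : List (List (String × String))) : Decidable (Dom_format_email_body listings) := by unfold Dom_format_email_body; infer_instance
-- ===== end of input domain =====

-- B drops A's intermediate line list entirely: each listing's block is one string built by
-- direct concatenation, and the listings are consumed by structural recursion that glues
-- blocks with "\n\n" as it returns (objective: alternative decomposition, same cost).

-- ===== PORT A =====
-- dict.get(k, dflt) on an association list: first match
def pvGet (d : List (String × String)) (k dflt : String) : String :=
  match d.find? (fun p => p.1 == k) with
  | some p => p.2
  | none => dflt

def format_email_body (listings : List (List (String × String))) : String :=
  if listings = [] then "No new listings found."
  else
    let n : Int := (listings.length : Int)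
    let lines := (PySem.List.enumerate listings 1).foldl (fun lines p =>
      let i := p.1
      let listing := p.2
      let title_line := PySem.Int.toStr i ++ ") " ++ pvGet listing "title" "Unknown"
      let status := PySem.Str.strip (pvGet listing "status" "")
      let title_line := if status ≠ "" then title_line ++ " (" ++ status ++ ")" else title_line
      let lines := lines ++ [title_line]
      let price := PySem.Str.strip (pvGet listing "price" "")
      let lines := if price ≠ "" then lines ++ ["   Price: " ++ price] else lines
      let location := PySem.Str.strip (pvGet listing "location" "")
      let lines := if location ≠ "" then lines ++ ["   Location: " ++ location] else lines
      let details := PySem.Str.strip (pvGet listing "details_text" "")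
      -- details.split('\n'): sep "\n" ≠ "" so split? is some; exact
      let lines := if details ≠ "" then
          ((PySem.Str.split? details "\n").getD []).foldl
            (fun ls dl => if PySem.Str.strip dl ≠ "" then ls ++ ["   " ++ dl] else ls) lines
        else lines
      let url := PySem.Str.strip (pvGet listing "url" "")
      let lines := if url ≠ "" then lines ++ ["   Link: " ++ url] else lines
      if i < n then lines ++ [""] else lines) []
    PySem.Str.join "\n" lines

-- ===== PORT B =====
-- one listing's block: a single string grown by concatenation (Source B's `s += …`)
def pvBlockStr (i : Int) (listing : List (String × String)) : String :=
  let s := PySem.Int.toStr i ++ ") " ++ pvGet listing "title" "Unknown"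
  let status := PySem.Str.strip (pvGet listing "status" "")
  let s := if status ≠ "" then s ++ " (" ++ status ++ ")" else s
  let price := PySem.Str.strip (pvGet listing "price" "")
  let s := if price ≠ "" then s ++ "\n   Price: " ++ price else s
  let location := PySem.Str.strip (pvGet listing "location" "")
  let s := if location ≠ "" then s ++ "\n   Location: " ++ location else s
  let details := PySem.Str.strip (pvGet listing "details_text" "")
  -- details.split('\n'): sep "\n" ≠ "" so split? is some; exact
  let s := if details ≠ "" then
      ((PySem.Str.split? details "\n").getD []).foldl
        (fun s dl => if PySem.Str.strip dl ≠ "" then s ++ "\n   " ++ dl else s) s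
    else s
  let url := PySem.Str.strip (pvGet listing "url" "")
  if url ≠ "" then s ++ "\n   Link: " ++ url else s

-- Source B's `rec`: structural recursion over the listings, "\n\n" between blocks
def pvRec (i : Int) : List (List (String × String)) → String
  | [] => ""
  | [x] => pvBlockStr i x
  | x :: y :: ys => pvBlockStr i x ++ "\n\n" ++ pvRec (i + 1) (y :: ys)

def format_email_body_alt (listings : List (List (String × String))) : String :=
  if listings = [] then "No new listings found."
  else pvRec 1 listings

-- ===== PRECONDITION & SPEC =====
def Spec_format_email_body (listings : List (List (String × String))) (out : String) : Prop := out = format_email_body_alt listings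
instance (listings : List (List (String × String))) (out : String) : Decidable (Spec_format_email_body listings out) := by unfold Spec_format_email_body; infer_instance

-- ===== CLAIM (what is proved, stated in full; the proofs are below) =====
def Claim_equal_format_email_body : Prop := ∀ (listings : List (List (String × String))), Dom_format_email_body listings → Spec_format_email_body listings (format_email_body listings)

-- ===== LEMMAS AND PROOFS =====

-- the lines of one listing's block, as a flat append of conditional pieces
def pvBlkLines (i : Int) (listing : List (String × String)) : List String :=
  let status := PySem.Str.strip (pvGet listing "status" "")
  let title_line :=
    if status ≠ "" then PySem.Int.toStr i ++ ") " ++ pvGet listing "title" "Unknown" ++ " (" ++ status ++ ")"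
    else PySem.Int.toStr i ++ ") " ++ pvGet listing "title" "Unknown"
  let price := PySem.Str.strip (pvGet listing "price" "")
  let location := PySem.Str.strip (pvGet listing "location" "")
  let details := PySem.Str.strip (pvGet listing "details_text" "")
  let url := PySem.Str.strip (pvGet listing "url" "")
  [title_line]
    ++ (if price ≠ "" then ["   Price: " ++ price] else [])
    ++ (if location ≠ "" then ["   Location: " ++ location] else [])
    ++ (if details ≠ "" then
          (((PySem.Str.split? details "\n").getD []).filter
            (fun dl => PySem.Str.strip dl ≠ "")).map (fun dl => "   " ++ dl)
        else [])
    ++ (if url ≠ "" then ["   Link: " ++ url] else [])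

lemma pvBlkLines_ne_nil (i : Int) (l : List (String × String)) : pvBlkLines i l ≠ [] := by
  unfold pvBlkLines; simp

-- string-append facts used to normalise both sides
lemma pvLitP : ("\n   Price: " : String) = "\n" ++ "   Price: " := by decide
lemma pvLitL : ("\n   Location: " : String) = "\n" ++ "   Location: " := by decide
lemma pvLitU : ("\n   Link: " : String) = "\n" ++ "   Link: " := by decide
lemma pvLitD : ("\n   " : String) = "\n" ++ "   " := by decide

-- join over a cons pair / singleton, at the String level
lemma pvJoin_cons2 (sep a b : String) (l : List String) :
    PySem.Str.join sep (a :: b :: l) = a ++ sep ++ PySem.Str.join sep (b :: l) := by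
  rw [← String.toList_inj]; simp [PySem.Str.toList_join, PySem.Chars.join_cons_cons]

lemma pvJoin_one (sep a : String) : PySem.Str.join sep [a] = a := by
  rw [← String.toList_inj]; simp [PySem.Str.toList_join, PySem.Chars.join_singleton]

-- folding ++ "\n" ++ y from a compound accumulator peels the prefix off
lemma pvFoldShift (ys : List String) : ∀ (a b : String),
    ys.foldl (fun x y => x ++ "\n" ++ y) (a ++ b) = a ++ ys.foldl (fun x y => x ++ "\n" ++ y) b := by
  induction ys with
  | nil => intro a b; simp
  | cons y ys ih =>
    intro a b
    simp only [List.foldl_cons]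
    rw [show (a ++ b) ++ "\n" ++ y = a ++ (b ++ "\n" ++ y) by
      simp only [String.append_assoc]]
    exact ih a (b ++ "\n" ++ y)

-- join "\n" of a nonempty list is the left fold of ++"\n"++ from its head
lemma pvJoin_eq_foldl : ∀ (rest : List String) (x : String),
    PySem.Str.join "\n" (x :: rest) = rest.foldl (fun a y => a ++ "\n" ++ y) x := by
  intro rest
  induction rest with
  | nil => intro x; exact pvJoin_one "\n" x
  | cons y ys ih =>
    intro x
    rw [pvJoin_cons2, ih y, List.foldl_cons,
        show x ++ "\n" ++ y = (x ++ "\n") ++ y from rfl, pvFoldShift,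
        String.append_assoc]

-- Source B's detail loop (string accumulation) = the ++"\n"++ fold over the filtered, indented lines
lemma pvFoldStr (L : List String) : ∀ (s0 : String),
    L.foldl (fun s dl => if PySem.Str.strip dl ≠ "" then s ++ "\n   " ++ dl else s) s0
    = ((L.filter (fun dl => PySem.Str.strip dl ≠ "")).map (fun dl => "   " ++ dl)).foldl
        (fun a y => a ++ "\n" ++ y) s0 := by
  induction L with
  | nil => intro s0; simp
  | cons x xs ih =>
    intro s0
    simp only [List.foldl_cons, List.filter_cons]
    by_cases h : PySem.Str.strip x = ""
    · simp only [h, ne_eq, not_true_eq_false, if_false, decide_false]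
      rw [ih]; simp
    · simp only [h, ne_eq, not_false_eq_true, if_true, decide_true, List.map_cons,
        List.foldl_cons]
      rw [ih, show s0 ++ "\n   " ++ x = s0 ++ "\n" ++ ("   " ++ x) by
        rw [pvLitD]; simp only [String.append_assoc]]

-- B's block string is the join of the block's lines
lemma pvBlockStr_eq (i : Int) (l : List (String × String)) :
    pvBlockStr i l = PySem.Str.join "\n" (pvBlkLines i l) := by
  unfold pvBlockStr pvBlkLines
  dsimp only
  rw [show ∀ (t : String) (A B C D : List String),
        PySem.Str.join "\n" ([t] ++ A ++ B ++ C ++ D)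
        = (D).foldl (fun a y => a ++ "\n" ++ y)
            ((C).foldl (fun a y => a ++ "\n" ++ y)
              ((B).foldl (fun a y => a ++ "\n" ++ y)
                ((A).foldl (fun a y => a ++ "\n" ++ y) t))) from by
    intro t A B C D
    rw [show ([t] ++ A ++ B ++ C ++ D) = t :: (A ++ B ++ C ++ D) by simp,
        pvJoin_eq_foldl]
    simp [List.foldl_append]]
  rw [pvFoldStr]
  split_ifs <;>
    simp only [List.foldl_cons, List.foldl_nil, pvLitP, pvLitL, pvLitU, String.append_assoc]

-- Source B's recursion = join "\n\n" over the enumerated block strings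
lemma pvRec_eq : ∀ (L : List (List (String × String))) (s : Int), L ≠ [] →
    pvRec s L = PySem.Str.join "\n\n" ((PySem.List.enumerate L s).map (fun p => pvBlockStr p.1 p.2)) := by
  intro L
  induction L with
  | nil => intro s h; exact absurd rfl h
  | cons x xs ih =>
    intro s _
    cases xs with
    | nil =>
      rw [PySem.List.enumerate_cons, PySem.List.enumerate_nil]
      simp [pvRec, pvJoin_one]
    | cons y ys =>
      rw [PySem.List.enumerate_cons]
      show pvBlockStr s x ++ "\n\n" ++ pvRec (s + 1) (y :: ys) = _
      rw [ih (s + 1) (by simp), List.map_cons]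
      have : PySem.List.enumerate (y :: ys) (s + 1) ≠ [] := by
        rw [PySem.List.enumerate_cons]; simp
      cases he : PySem.List.enumerate (y :: ys) (s + 1) with
      | nil => exact absurd he this
      | cons p ps => rw [List.map_cons, pvJoin_cons2]

-- ===== A-side lemmas =====
lemma pvDetails_foldl (l : List String) (acc : List String) :
    l.foldl (fun ls dl => if PySem.Str.strip dl ≠ "" then ls ++ ["   " ++ dl] else ls) acc
    = acc ++ (l.filter (fun dl => PySem.Str.strip dl ≠ "")).map (fun dl => "   " ++ dl) := by
  induction l generalizing acc with
  | nil => simp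
  | cons x xs ih =>
    simp only [List.foldl_cons, List.filter_cons]
    by_cases h : PySem.Str.strip x = ""
    · rw [if_neg (by simp [h]), ih]; simp [h]
    · rw [if_pos h, ih]; simp [h]

lemma pvFold_eq (n : Int) (L : List (List (String × String))) :
    ∀ (s : Int) (acc : List String),
    (PySem.List.enumerate L s).foldl (fun lines p =>
      let i := p.1
      let listing := p.2
      let title_line := PySem.Int.toStr i ++ ") " ++ pvGet listing "title" "Unknown"
      let status := PySem.Str.strip (pvGet listing "status" "")
      let title_line := if status ≠ "" then title_line ++ " (" ++ status ++ ")" else title_line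
      let lines := lines ++ [title_line]
      let price := PySem.Str.strip (pvGet listing "price" "")
      let lines := if price ≠ "" then lines ++ ["   Price: " ++ price] else lines
      let location := PySem.Str.strip (pvGet listing "location" "")
      let lines := if location ≠ "" then lines ++ ["   Location: " ++ location] else lines
      let details := PySem.Str.strip (pvGet listing "details_text" "")
      let lines := if details ≠ "" then
          ((PySem.Str.split? details "\n").getD []).foldl
            (fun ls dl => if PySem.Str.strip dl ≠ "" then ls ++ ["   " ++ dl] else ls) lines
        else lines
      let url := PySem.Str.strip (pvGet listing "url" "")
      let lines := if url ≠ "" then lines ++ ["   Link: " ++ url] else lines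
      if i < n then lines ++ [""] else lines) acc
    = acc ++ (PySem.List.enumerate L s).flatMap
        (fun p => pvBlkLines p.1 p.2 ++ if p.1 < n then [""] else []) := by
  induction L with
  | nil => intro s acc; simp [PySem.List.enumerate_nil]
  | cons x xs ih =>
    intro s acc
    rw [PySem.List.enumerate_cons]
    simp only [List.foldl_cons, List.flatMap_cons]
    rw [ih]
    conv_rhs => rw [← List.append_assoc]
    congr 1
    dsimp only
    simp only [pvDetails_foldl]
    unfold pvBlkLines
    dsimp only
    split_ifs <;> simp

-- intercalate over a cons with nonempty tail
lemma map_intersperse' {α β : Type} (g : α → β) (sep : α) :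
    ∀ (l : List α), List.map g (List.intersperse sep l) = List.intersperse (g sep) (List.map g l)
  | [] => by simp
  | [a] => by simp
  | a :: b :: l => by
    rw [show List.intersperse sep (a :: b :: l) = a :: sep :: List.intersperse sep (b :: l) from rfl,
        show List.intersperse (g sep) (List.map g (a :: b :: l))
          = g a :: g sep :: List.intersperse (g sep) (g b :: List.map g l) from rfl]
    simp [map_intersperse' g sep (b :: l)]

lemma map_intercalate' {α β : Type} (g : α → β) (sep : List α) (l : List (List α)) :
    List.map g (List.intercalate sep l) = List.intercalate (List.map g sep) (l.map (List.map g)) := by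
  simp only [List.intercalate, List.map_flatten, map_intersperse']

lemma intercalate_cons_ne {α : Type} (sep a : List α) (l : List (List α)) (h : l ≠ []) :
    List.intercalate sep (a :: l) = a ++ sep ++ List.intercalate sep l := by
  cases l with
  | nil => exact absurd rfl h
  | cons b bs =>
    simp [List.intercalate, List.intersperse]

-- splitting an intercalate at an append, first part nonempty
lemma intercalate_append_ne {α : Type} (sep : List α) :
    ∀ (b : List (List α)) (m : List α) (M : List (List α)), b ≠ [] →
    List.intercalate sep (b ++ m :: M) = List.intercalate sep b ++ sep ++ List.intercalate sep (m :: M) := by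
  intro b
  induction b with
  | nil => intro m M h; exact absurd rfl h
  | cons a b' ih =>
    intro m M _
    cases b' with
    | nil =>
      rw [List.singleton_append, intercalate_cons_ne sep a (m :: M) (by simp)]
      simp [List.intercalate]
    | cons c cs =>
      rw [List.cons_append, intercalate_cons_ne sep a ((c :: cs) ++ m :: M) (by simp),
          intercalate_cons_ne sep a (c :: cs) (by simp), ih m M (by simp)]
      simp [List.append_assoc]

lemma intercalate_blank_ne_nil {α : Type} (bs : List (List α)) (rest : List (List (List α)))
    (hb : bs ≠ []) : List.intercalate [([] : List α)] (bs :: rest) ≠ [] := by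
  cases rest with
  | nil => simpa [List.intercalate]
  | cons r rs => rw [intercalate_cons_ne _ _ _ (by simp)]; simp [hb]

-- the core join identity: single separators between blank-separated blocks = double separators between joined blocks
lemma pvCore {α : Type} (c : List α) :
    ∀ (bs : List (List (List α))), bs ≠ [] → (∀ b ∈ bs, b ≠ []) →
    List.intercalate c (List.intercalate [([] : List α)] bs)
    = List.intercalate (c ++ c) (bs.map (List.intercalate c)) := by
  intro bs
  induction bs with
  | nil => intro h; exact absurd rfl h
  | cons b rest ih =>
    intro _ hne
    cases rest with
    | nil => simp [List.intercalate]
    | cons r rs =>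
      have hb : b ≠ [] := hne b (by simp)
      have hr : r ≠ [] := hne r (by simp)
      rw [intercalate_cons_ne [([] : List α)] b (r :: rs) (by simp), List.append_assoc,
          show ([([] : List α)] ++ [([] : List α)].intercalate (r :: rs))
            = ([] : List α) :: [([] : List α)].intercalate (r :: rs) from rfl,
          intercalate_append_ne c b _ _ hb,
          intercalate_cons_ne c [] (List.intercalate [([] : List α)] (r :: rs))
            (intercalate_blank_ne_nil r rs hr)]
      rw [List.map_cons, intercalate_cons_ne (c ++ c) _ _ (by simp),
          ih (by simp) (fun x hx => hne x (by simp [hx]))]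
      simp [List.append_assoc]

-- flatMap with a conditional trailing separator = intercalate, when indices run s..n
lemma pvChain {β : Type} (n : Int) (e : β) {α : Type} (F : Int × α → List β) :
    ∀ (L : List α) (s : Int), s + L.length = n + 1 →
    (PySem.List.enumerate L s).flatMap (fun p => F p ++ if p.1 < n then [e] else [])
    = List.intercalate [e] ((PySem.List.enumerate L s).map F) := by
  intro L
  induction L with
  | nil => intro s _; simp [PySem.List.enumerate_nil, List.intercalate]
  | cons x xs ih =>
    intro s hs
    rw [PySem.List.enumerate_cons]
    cases xs with
    | nil =>
      have : ¬ (s < n) := by simp at hs; omega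
      simp [PySem.List.enumerate_nil, this, List.intercalate]
    | cons y ys =>
      have hlt : s < n := by simp at hs; omega
      have hxs : s + 1 + (List.length (y :: ys) : Int) = n + 1 := by simp at hs ⊢; omega
      rw [List.flatMap_cons, ih (s + 1) hxs, List.map_cons,
          intercalate_cons_ne [e] (F (s, x)) _ (by rw [PySem.List.enumerate_cons]; simp)]
      simp [hlt, List.append_assoc]

-- ===== VERDICT (by name: the statement is the Claim_ definition above) =====
theorem format_email_body_spec : Claim_equal_format_email_body := by
  intro listings _
  unfold Spec_format_email_body format_email_body format_email_body_alt
  by_cases hnil : listings = []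
  · simp [hnil]
  · simp only [hnil, ite_false]
    rw [pvRec_eq listings 1 hnil]
    rw [pvFold_eq ((listings.length : Int)) listings 1 []]
    rw [pvChain ((listings.length : Int)) "" (fun p => pvBlkLines p.1 p.2) listings 1 (by omega)]
    rw [← String.toList_inj]
    simp only [PySem.Str.toList_join, List.nil_append]
    have hmapjoin : List.map String.toList
        ((PySem.List.enumerate listings 1).map (fun p => pvBlockStr p.1 p.2))
        = ((PySem.List.enumerate listings 1).map (fun p => List.map String.toList (pvBlkLines p.1 p.2))).map
            (List.intercalate ("\n".toList)) := by
      simp only [List.map_map]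
      refine List.map_congr_left ?_
      intro p _
      simp [Function.comp, pvBlockStr_eq, PySem.Str.toList_join, PySem.Chars.join]
    rw [hmapjoin]
    have hinter : List.map String.toList
        (List.intercalate [""] ((PySem.List.enumerate listings 1).map (fun p => pvBlkLines p.1 p.2)))
        = List.intercalate [([] : List Char)]
            ((PySem.List.enumerate listings 1).map (fun p => List.map String.toList (pvBlkLines p.1 p.2))) := by
      rw [map_intercalate']
      simp [List.map_map, Function.comp_def]
    rw [hinter]
    have := pvCore ("\n".toList)
      ((PySem.List.enumerate listings 1).map (fun p => List.map String.toList (pvBlkLines p.1 p.2)))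
      (by cases listings with | nil => exact absurd rfl hnil | cons a as => rw [PySem.List.enumerate_cons]; simp)
      (by intro b hb; simp only [List.mem_map] at hb; obtain ⟨p, _, rfl⟩ := hb
          simp [pvBlkLines_ne_nil])
    simpa [PySem.Chars.join] using this
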